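-- pv_equiv track=rewrite | github.com/FrrrankZhou/ccc | 2011/s3.py | is_crystal
-- ===== SOURCE A (Python) =====
-- base = ((1, 0), (2, 0), (3, 0), (2, 1))
--
-- def is_crystal(m, x, y) -> bool:
--     if m == 1:
--         if (x, y) in base:
--             return True
--         else:
--             return False
--     if is_crystal(m - 1, x // 5, y // 5):
--         return True
--     elif is_crystal(m - 1, x // 5, (y // 5) - 1) and (x % 5, y % 5) in base:
--         return True
--     else:
--         return False
-- ===== SOURCE B (Python) =====
-- _base = {(1, 0), (2, 0), (3, 0), (2, 1)}
--
-- def is_crystal(m, x, y) -> bool: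
--     # Bottom-up DP over the base-5 digits of (x, y): at each level only the
--     # three values f(k, x_k, y_k - d), d in {0,1,2}, are ever needed.
--     digs = []
--     xs, ys = x, y
--     for _ in range(m - 1):
--         digs.append((xs % 5, ys % 5))
--         xs //= 5
--         ys //= 5
--     a0 = (xs, ys) in _base
--     a1 = (xs, ys - 1) in _base
--     a2 = (xs, ys - 2) in _base
--     for xd, yd in reversed(digs):
--         n0 = a0 or (a1 and (xd, yd) in _base)
--         n1 = (a1 or (a2 and (xd, (yd - 1) % 5) in _base)) if yd < 1 else (a0 or (a1 and (xd, yd - 1) in _base))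
--         n2 = (a1 or (a2 and (xd, (yd - 2) % 5) in _base)) if yd < 2 else (a0 or (a1 and (xd, yd - 2) in _base))
--         a0, a1, a2 = n0, n1, n2
--     return a0
-- ===== Notes on version B (the rewrite author's own statement) =====
-- stated objective: faster
-- what changed: Replaces A's exponential double recursion by a single bottom-up pass over the base-5 digits of (x, y), keeping only the three reachable values f(k, x_k, y_k - d), d in {0,1,2}, per level.
import Mathlib
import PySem

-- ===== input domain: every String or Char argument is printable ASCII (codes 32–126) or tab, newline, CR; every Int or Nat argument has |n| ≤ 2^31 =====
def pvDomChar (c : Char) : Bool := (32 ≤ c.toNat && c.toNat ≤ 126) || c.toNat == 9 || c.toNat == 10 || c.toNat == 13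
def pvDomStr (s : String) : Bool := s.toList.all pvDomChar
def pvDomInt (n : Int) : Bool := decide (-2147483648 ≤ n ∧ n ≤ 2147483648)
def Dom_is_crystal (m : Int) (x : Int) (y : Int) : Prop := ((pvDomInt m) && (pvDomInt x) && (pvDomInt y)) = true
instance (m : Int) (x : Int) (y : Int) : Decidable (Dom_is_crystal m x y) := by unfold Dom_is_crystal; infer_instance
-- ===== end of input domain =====

-- B replaces A's exponential double recursion by a single bottom-up pass over the
-- base-5 digits of (x, y), keeping only the three reachable y-offsets per level (faster, asymptotic).

-- ===== PORT A =====
-- base = ((1, 0), (2, 0), (3, 0), (2, 1))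
def pvBase : List (Int × Int) := [(1, 0), (2, 0), (3, 0), (2, 1)]

-- A's recursion on m, indexed by the fuel n = m - 1 (Python raises RecursionError for m < 1,
-- excluded by Pre_); fuel 0 is the 'm == 1' base case, fuel n+1 recurses with fuel n.
def isCrystalGoA : Nat → Int → Int → Bool
  | 0, x, y => if pvBase.contains (x, y) then true else false
  | n + 1, x, y =>
      if isCrystalGoA n (PySem.Int.floordiv x 5) (PySem.Int.floordiv y 5) then true
      else if isCrystalGoA n (PySem.Int.floordiv x 5) (PySem.Int.floordiv y 5 - 1)
              && pvBase.contains (PySem.Int.mod x 5, PySem.Int.mod y 5) then true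
      else false

def is_crystal (m : Int) (x : Int) (y : Int) : Bool := isCrystalGoA (m - 1).toNat x y

-- ===== PORT B =====
-- the loop 'for _ in range(m - 1): digs.append((xs % 5, ys % 5)); xs //= 5; ys //= 5'
-- returning (digs, xs, ys)
def pvDigs : Nat → Int → Int → List (Int × Int) × Int × Int
  | 0, xs, ys => ([], xs, ys)
  | n + 1, xs, ys =>
      let r := pvDigs n (PySem.Int.floordiv xs 5) (PySem.Int.floordiv ys 5)
      ((PySem.Int.mod xs 5, PySem.Int.mod ys 5) :: r.1, r.2)

-- one iteration of B's 'for xd, yd in reversed(digs)' loop on the state (a0, a1, a2)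
def pvStep (a : Bool × Bool × Bool) (p : Int × Int) : Bool × Bool × Bool :=
  let xd := p.1; let yd := p.2
  let n0 := a.1 || (a.2.1 && pvBase.contains (xd, yd))
  let n1 := if yd < 1 then a.2.1 || (a.2.2 && pvBase.contains (xd, PySem.Int.mod (yd - 1) 5))
            else a.1 || (a.2.1 && pvBase.contains (xd, yd - 1))
  let n2 := if yd < 2 then a.2.1 || (a.2.2 && pvBase.contains (xd, PySem.Int.mod (yd - 2) 5))
            else a.1 || (a.2.1 && pvBase.contains (xd, yd - 2))
  (n0, n1, n2)

def is_crystal_alt (m : Int) (x : Int) (y : Int) : Bool :=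
  let r := pvDigs (m - 1).toNat x y
  let xs := r.2.1
  let ys := r.2.2
  let a : Bool × Bool × Bool :=
    (pvBase.contains (xs, ys), pvBase.contains (xs, ys - 1), pvBase.contains (xs, ys - 2))
  (r.1.reverse.foldl pvStep a).1

-- ===== PRECONDITION & SPEC =====
-- Python A recurses forever (RecursionError) when m < 1: those inputs are excluded.
def Pre_is_crystal (m : Int) (x : Int) (y : Int) : Prop := 1 ≤ m
instance (m : Int) (x : Int) (y : Int) : Decidable (Pre_is_crystal m x y) := by unfold Pre_is_crystal; infer_instance
def pvWitness_is_crystal : Int × Int × Int := (2, 5, 0)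
def Spec_is_crystal (m : Int) (x : Int) (y : Int) (out : Bool) : Prop := out = is_crystal_alt m x y
instance (m : Int) (x : Int) (y : Int) (out : Bool) : Decidable (Spec_is_crystal m x y out) := by unfold Spec_is_crystal; infer_instance

-- ===== CLAIM (what is proved, stated in full; the proofs are below) =====
def Claim_equal_is_crystal : Prop := ∀ (m : Int) (x : Int) (y : Int), Dom_is_crystal m x y → Pre_is_crystal m x y → Spec_is_crystal m x y (is_crystal m x y)

-- ===== LEMMAS AND PROOFS =====

theorem pvFd5 (a : Int) : PySem.Int.floordiv a 5 = a / 5 :=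
  PySem.Int.floordiv_eq_ediv_of_pos (by omega)

theorem pvMod5 (a : Int) : PySem.Int.mod a 5 = a % 5 :=
  PySem.Int.mod_eq_emod_of_pos (by omega)

-- A at fuel n+1, written as the boolean expression the DP step uses
theorem goA_succ (n : Nat) (x y : Int) :
    isCrystalGoA (n + 1) x y =
      (isCrystalGoA n (x / 5) (y / 5) ||
        (isCrystalGoA n (x / 5) (y / 5 - 1) && pvBase.contains (x % 5, y % 5))) := by
  simp only [isCrystalGoA, pvFd5, pvMod5]
  cases isCrystalGoA n (x / 5) (y / 5) <;>
    cases isCrystalGoA n (x / 5) (y / 5 - 1) <;> simp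

-- the DP step maps the level-n triple to the level-(n+1) triple
theorem pvStep_correct (n : Nat) (x y : Int) :
    pvStep (isCrystalGoA n (x / 5) (y / 5), isCrystalGoA n (x / 5) (y / 5 - 1),
            isCrystalGoA n (x / 5) (y / 5 - 2))
           (PySem.Int.mod x 5, PySem.Int.mod y 5) =
      (isCrystalGoA (n + 1) x y, isCrystalGoA (n + 1) x (y - 1), isCrystalGoA (n + 1) x (y - 2)) := by
  simp only [pvStep, pvMod5, goA_succ]
  refine Prod.ext rfl (Prod.ext ?_ ?_) <;> dsimp only
  · by_cases h : y % 5 < 1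
    · rw [if_pos h]
      have h1 : (y - 1) / 5 = y / 5 - 1 := by omega
      have h2 : (y - 1) % 5 = (y % 5 - 1) % 5 := by omega
      rw [h1, h2]
      ring_nf
    · rw [if_neg h]
      have h1 : (y - 1) / 5 = y / 5 := by omega
      have h2 : (y - 1) % 5 = y % 5 - 1 := by omega
      rw [h1, h2]
  · by_cases h : y % 5 < 2
    · rw [if_pos h]
      have h1 : (y - 2) / 5 = y / 5 - 1 := by omega
      have h2 : (y - 2) % 5 = (y % 5 - 2) % 5 := by omega
      rw [h1, h2]
      ring_nf
    · rw [if_neg h]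
      have h1 : (y - 2) / 5 = y / 5 := by omega
      have h2 : (y - 2) % 5 = y % 5 - 2 := by omega
      rw [h1, h2]

-- main invariant: folding B's step over the digit list reproduces A's triple at fuel n
theorem pvDP_correct (n : Nat) (x y : Int) :
    ((pvDigs n x y).1.reverse.foldl pvStep
        (pvBase.contains ((pvDigs n x y).2.1, (pvDigs n x y).2.2),
         pvBase.contains ((pvDigs n x y).2.1, (pvDigs n x y).2.2 - 1),
         pvBase.contains ((pvDigs n x y).2.1, (pvDigs n x y).2.2 - 2))) =
      (isCrystalGoA n x y, isCrystalGoA n x (y - 1), isCrystalGoA n x (y - 2)) := by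
  induction n generalizing x y with
  | zero =>
      simp [pvDigs, isCrystalGoA]
  | succ n ih =>
      simp only [pvDigs, List.reverse_cons, List.foldl_append, List.foldl_cons, List.foldl_nil]
      rw [ih (PySem.Int.floordiv x 5) (PySem.Int.floordiv y 5)]
      rw [pvFd5, pvFd5]
      exact pvStep_correct n x y

-- ===== VERDICT (by name: the statement is the Claim_ definition above) =====
theorem is_crystal_spec : Claim_equal_is_crystal := by
  intro m x y _ _
  unfold Spec_is_crystal is_crystal is_crystal_alt
  exact (congrArg Prod.fst (pvDP_correct (m - 1).toNat x y)).symm
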